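-- pv_equiv track=rewrite | github.com/StefanVlad0/GAD-Python | session3.py | rec_function
-- ===== SOURCE A (Python) =====
-- def rec_function(my_list):
--     if not my_list:
--         return 0, 0, 0
--
--     total_sum, even_sum, odd_sum = rec_function(my_list[1:])
--
--     current_number = my_list[0]
--
--     new_total_sum = total_sum + current_number
--     mew_even_sum = even_sum
--     new_odd_sum = odd_sum
--
--     if current_number % 2 == 0:
--         mew_even_sum += current_number
--     else:
--         new_odd_sum += current_number
--
--     return new_total_sum, mew_even_sum, new_odd_sum
-- ===== SOURCE B (Python) =====
-- def rec_function(my_list):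
--     total_sum = even_sum = odd_sum = 0
--     for x in my_list:
--         total_sum += x
--         if x % 2 == 0:
--             even_sum += x
--         else:
--             odd_sum += x
--     return total_sum, even_sum, odd_sum
-- ===== Notes on version B (the rewrite author's own statement) =====
-- stated objective: faster
-- what changed: Replaces the recursion that re-slices my_list[1:] at every level (quadratic copying, and recursion-depth limited) with a single linear loop accumulating the three sums.
import Mathlib
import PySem

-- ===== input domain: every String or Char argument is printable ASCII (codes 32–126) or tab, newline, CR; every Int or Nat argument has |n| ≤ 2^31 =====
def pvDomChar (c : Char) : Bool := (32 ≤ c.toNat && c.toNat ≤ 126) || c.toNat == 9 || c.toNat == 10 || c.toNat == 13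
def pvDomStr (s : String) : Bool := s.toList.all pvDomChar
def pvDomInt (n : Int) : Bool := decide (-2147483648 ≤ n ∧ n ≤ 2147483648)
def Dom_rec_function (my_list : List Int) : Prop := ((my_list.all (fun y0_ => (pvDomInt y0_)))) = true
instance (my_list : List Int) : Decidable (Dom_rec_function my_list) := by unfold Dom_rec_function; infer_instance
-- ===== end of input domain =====

-- B replaces A's slice-and-recurse (quadratic copying) with one linear accumulating loop.

-- ===== PORT A =====
def rec_function (my_list : List Int) : Int × Int × Int :=
  match my_list with
  | [] => (0, 0, 0)
  | current_number :: rest =>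
    let r := rec_function rest          -- rec_function(my_list[1:])
    let total_sum := r.1
    let even_sum := r.2.1
    let odd_sum := r.2.2
    let new_total_sum := total_sum + current_number
    let mew_even_sum := even_sum
    let new_odd_sum := odd_sum
    if current_number % 2 == 0 then
      (new_total_sum, mew_even_sum + current_number, new_odd_sum)
    else
      (new_total_sum, mew_even_sum, new_odd_sum + current_number)

-- ===== PORT B =====
def rec_function_alt (my_list : List Int) : Int × Int × Int :=
  my_list.foldl (fun acc x =>
    let total_sum := acc.1 + x
    if x % 2 == 0 then (total_sum, acc.2.1 + x, acc.2.2)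
    else (total_sum, acc.2.1, acc.2.2 + x)) (0, 0, 0)

-- ===== PRECONDITION & SPEC =====
def Spec_rec_function (my_list : List Int) (out : Int × Int × Int) : Prop := out = rec_function_alt my_list
instance (my_list : List Int) (out : Int × Int × Int) : Decidable (Spec_rec_function my_list out) := by unfold Spec_rec_function; infer_instance

-- ===== CLAIM (what is proved, stated in full; the proofs are below) =====
def Claim_equal_rec_function : Prop := ∀ (my_list : List Int), Dom_rec_function my_list → Spec_rec_function my_list (rec_function my_list)

-- ===== LEMMAS AND PROOFS =====

theorem rec_function_fold (l : List Int) (a b c : Int) :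
    l.foldl (fun acc x =>
      let total_sum := acc.1 + x
      if x % 2 == 0 then (total_sum, acc.2.1 + x, acc.2.2)
      else (total_sum, acc.2.1, acc.2.2 + x)) (a, b, c)
    = (a + (rec_function l).1, b + (rec_function l).2.1, c + (rec_function l).2.2) := by
  induction l generalizing a b c with
  | nil => simp [rec_function]
  | cons x rest ih =>
    by_cases h : (x % 2 == 0) = true <;>
      simp only [List.foldl_cons, rec_function, h, if_true, if_false, Bool.false_eq_true, ih] <;>
      refine Prod.ext ?_ (Prod.ext ?_ ?_) <;> simp <;> ring

-- ===== VERDICT (by name: the statement is the Claim_ definition above) =====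
theorem rec_function_spec : Claim_equal_rec_function := by
  intro l _
  unfold Spec_rec_function rec_function_alt
  rw [rec_function_fold]
  simp
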